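-- pv_equiv track=rewrite | github.com/denniselorm/python_projects | Pair_Match/Pair_Match/Pair_Match.py | matchPair
-- ===== SOURCE A (Python) =====
-- def matchPair(a):
--     b = {}
--     pairCount = 0
--     for i in range(len(a)):
--         if a[i] in b.keys():
--             value = b[a[i]]
--             b[a[i]] = value + 1
--         else:
--             value = 0
--             b[a[i]] = value + 1
--
--     for v in b.values():
--         pairCount = pairCount + int(v/2)
--     return pairCount
-- ===== SOURCE B (Python) =====
-- def matchPair(a):
--     unpaired = set()
--     pairCount = 0
--     for x in a:
--         if x in unpaired:
--             unpaired.discard(x)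
--             pairCount += 1
--         else:
--             unpaired.add(x)
--     return pairCount
-- ===== Notes on version B (the rewrite author's own statement) =====
-- stated objective: simpler
-- what changed: Replaces the two-pass frequency-dict algorithm (build counts, then sum count//2 over values) by a single pass that keeps only the set of currently-unpaired elements and increments a counter whenever the current element closes a pair; the second summing loop disappears entirely.
import Mathlib
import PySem

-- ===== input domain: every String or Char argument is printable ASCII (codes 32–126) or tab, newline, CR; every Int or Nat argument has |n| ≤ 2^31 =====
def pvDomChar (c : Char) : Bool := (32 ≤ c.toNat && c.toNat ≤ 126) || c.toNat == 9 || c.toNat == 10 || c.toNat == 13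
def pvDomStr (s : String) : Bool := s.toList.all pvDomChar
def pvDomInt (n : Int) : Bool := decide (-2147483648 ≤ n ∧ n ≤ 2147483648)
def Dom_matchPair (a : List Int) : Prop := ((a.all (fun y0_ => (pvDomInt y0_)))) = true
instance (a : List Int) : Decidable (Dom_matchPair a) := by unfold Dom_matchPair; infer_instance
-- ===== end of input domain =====

-- B replaces A's two passes (frequency dict, then sum of count//2) by one pass over a set of
-- currently-unpaired elements; objective: simpler (same O(n) cost).

-- ===== PORT A =====
def matchPair (a : List Int) : Int :=
  let b := (PySem.List.pyRange 0 (a.length : Int) 1).foldl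
    (fun (d : PySem.Dict Int Int) i =>
      let x := PySem.List.pyGetD a i 0
      if d.contains x then
        let value := d.getD x 0
        d.insert x (value + 1)
      else
        let value : Int := 0
        d.insert x (value + 1)) PySem.Dict.empty
  b.values.foldl (fun pairCount v => pairCount + PySem.Int.truncdiv v 2) 0

-- ===== PORT B =====
def matchPair_alt (a : List Int) : Int :=
  (a.foldl (fun (st : PySem.Set Int × Int) x =>
      if x ∈ st.1 then (st.1.discard x, st.2 + 1)
      else (st.1.add x, st.2)) (PySem.Set.empty, 0)).2

-- ===== PRECONDITION & SPEC =====
def Spec_matchPair (a : List Int) (out : Int) : Prop := out = matchPair_alt a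
instance (a : List Int) (out : Int) : Decidable (Spec_matchPair a out) := by unfold Spec_matchPair; infer_instance

-- ===== CLAIM (what is proved, stated in full; the proofs are below) =====
def Claim_equal_matchPair : Prop := ∀ (a : List Int), Dom_matchPair a → Spec_matchPair a (matchPair a)

-- ===== LEMMAS AND PROOFS =====

-- A's dict-building step is exactly the counter step (in the 'absent' branch the default is the count 0).
theorem stepA_eq : (fun (d : PySem.Dict Int Int) (x : Int) =>
    if d.contains x then d.insert x (d.getD x 0 + 1) else d.insert x (0 + 1))
    = fun (d : PySem.Dict Int Int) (x : Int) => d.insert x (d.getD x 0 + 1) := by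
  funext d x
  by_cases h : d.contains x
  · simp [h]
  · simp [h, PySem.Dict.getD_of_not_contains d (0 : Int) (by simpa using h)]

-- A as a sum over the distinct elements of a.
theorem matchPair_eq_sum (a : List Int) :
    matchPair a = ((PySem.Set.ofList a).map (fun k => ((a.count k / 2 : Nat) : Int))).sum := by
  unfold matchPair
  rw [PySem.List.foldl_pyRange_pyGetD' a 0
    (fun (d : PySem.Dict Int Int) (x : Int) =>
      if d.contains x then d.insert x (d.getD x 0 + 1) else d.insert x (0 + 1))
    PySem.Dict.empty (le_refl 0)]
  simp only [Int.toNat_zero, List.drop_zero, stepA_eq,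
    PySem.Dict.foldl_insert_getD_add_one_eq_counter, PySem.List.foldl_add]
  have hv : (PySem.Dict.counter a).values
      = (PySem.Set.ofList a).map (fun k => ((a.count k : Nat) : Int)) := by
    show (PySem.Dict.counter a).items.map (·.2) = _
    rw [PySem.Dict.items_counter]
    simp [List.map_map, Function.comp]
  rw [hv, List.map_map, zero_add]
  congr 1

-- changing one term of a sum over a duplicate-free list
theorem sum_map_single_change {s : List Int} (hs : s.Nodup) {x : Int} (hx : x ∈ s)
    (f g : Int → Int) (hne : ∀ k ∈ s, k ≠ x → f k = g k) :
    (s.map g).sum = (s.map f).sum + (g x - f x) := by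
  induction s with
  | nil => cases hx
  | cons y t ih =>
    simp only [List.map_cons, List.sum_cons]
    rcases List.mem_cons.mp hx with h | h
    · subst h
      have : t.map g = t.map f := by
        apply List.map_congr_left
        intro k hk
        exact (hne k (List.mem_cons_of_mem _ hk) (fun he => (List.nodup_cons.mp hs).1 (he ▸ hk))).symm
      rw [this]; ring
    · have hyx : y ≠ x := fun he => (List.nodup_cons.mp hs).1 (he ▸ h)
      rw [hne y (List.mem_cons_self) hyx,
        ih (List.nodup_cons.mp hs).2 h (fun k hk => hne k (List.mem_cons_of_mem _ hk))]
      ring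

-- the invariant of B's single pass: the set holds exactly the elements seen an odd number of
-- times, and the counter equals A's sum of count/2 over the distinct elements.
theorem bfold_invariant (l : List Int) :
    (∀ y, y ∈ (l.foldl (fun (st : PySem.Set Int × Int) x =>
        if x ∈ st.1 then (st.1.discard x, st.2 + 1)
        else (st.1.add x, st.2)) (PySem.Set.empty, 0)).1 ↔ l.count y % 2 = 1) ∧
    (l.foldl (fun (st : PySem.Set Int × Int) x =>
        if x ∈ st.1 then (st.1.discard x, st.2 + 1)
        else (st.1.add x, st.2)) (PySem.Set.empty, 0)).1.Nodup ∧
    (l.foldl (fun (st : PySem.Set Int × Int) x =>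
        if x ∈ st.1 then (st.1.discard x, st.2 + 1)
        else (st.1.add x, st.2)) (PySem.Set.empty, 0)).2
      = ((PySem.Set.ofList l).map (fun k => ((l.count k / 2 : Nat) : Int))).sum := by
  induction l using List.reverseRecOn with
  | nil => refine ⟨by simp [PySem.Set.empty], by simp [PySem.Set.empty], by simp⟩
  | append_singleton l x ih =>
    obtain ⟨hmem, hnd, hsum⟩ := ih
    rw [List.foldl_append] at *
    simp only [List.foldl_cons, List.foldl_nil]
    set st := (l.foldl (fun (st : PySem.Set Int × Int) x =>
        if x ∈ st.1 then (st.1.discard x, st.2 + 1)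
        else (st.1.add x, st.2)) (PySem.Set.empty, 0)) with hst
    have hcnt : ∀ y : Int, (l ++ [x]).count y = l.count y + (if y = x then 1 else 0) := by
      intro y; by_cases h : y = x
      · simp [h, List.count_append]
      · simp [h, List.count_append, List.count_eq_zero]
    by_cases hx : x ∈ st.1
    · -- x closes a pair
      have hodd : l.count x % 2 = 1 := (hmem x).mp hx
      have hxl : x ∈ l := List.count_pos_iff.mp (by omega)
      simp only [hx, if_pos]
      refine ⟨?_, PySem.Set.nodup_discard _ _ hnd, ?_⟩
      · intro y
        rw [PySem.Set.mem_discard, hmem y, hcnt y]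
        by_cases h : y = x <;> simp [h] <;> omega
      · rw [PySem.Set.ofList_append_singleton,
          PySem.Set.add_of_mem (by rw [PySem.Set.mem_ofList]; exact hxl), hsum,
          sum_map_single_change (PySem.Set.nodup_ofList l)
            (by rw [PySem.Set.mem_ofList]; exact hxl)
            (fun k => ((l.count k / 2 : Nat) : Int))
            (fun k => (((l ++ [x]).count k / 2 : Nat) : Int))
            (fun k _ hk => by simp [hcnt k, hk])]
        simp only [hcnt x, if_true]
        have h2 : (l.count x + 1) / 2 = l.count x / 2 + 1 := by omega
        rw [h2]
        push_cast
        ring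
    · -- x becomes unpaired
      have heven : l.count x % 2 = 0 := by
        have := (hmem x).not.mp hx; omega
      simp only [hx, if_neg, not_false_iff]
      refine ⟨?_, PySem.Set.nodup_add _ _ hnd, ?_⟩
      · intro y
        rw [PySem.Set.mem_add, hmem y, hcnt y]
        by_cases h : y = x <;> simp [h] <;> omega
      · by_cases hxl : x ∈ l
        · rw [PySem.Set.ofList_append_singleton,
            PySem.Set.add_of_mem (by rw [PySem.Set.mem_ofList]; exact hxl), hsum,
            sum_map_single_change (PySem.Set.nodup_ofList l)
              (by rw [PySem.Set.mem_ofList]; exact hxl)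
              (fun k => ((l.count k / 2 : Nat) : Int))
              (fun k => (((l ++ [x]).count k / 2 : Nat) : Int))
              (fun k _ hk => by simp [hcnt k, hk])]
          simp only [hcnt x, if_true]
          have h2 : (l.count x + 1) / 2 = l.count x / 2 := by omega
          rw [h2]
          ring
        · have hc0 : l.count x = 0 := List.count_eq_zero.mpr hxl
          rw [PySem.Set.ofList_append_singleton,
            PySem.Set.add_of_not_mem (by rw [PySem.Set.mem_ofList]; exact hxl),
            List.map_append, List.sum_append, hsum]
          have hmapeq : (PySem.Set.ofList l).map (fun k => (((l ++ [x]).count k / 2 : Nat) : Int))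
              = (PySem.Set.ofList l).map (fun k => ((l.count k / 2 : Nat) : Int)) := by
            apply List.map_congr_left
            intro k hk
            have : k ≠ x := fun he => hxl (he ▸ (PySem.Set.mem_ofList l k).mp hk)
            rw [hcnt k]; simp [this]
          rw [hmapeq]
          simp [hc0]

-- ===== VERDICT (by name: the statement is the Claim_ definition above) =====
theorem matchPair_spec : Claim_equal_matchPair := by
  intro a _
  show matchPair a = matchPair_alt a
  rw [matchPair_eq_sum]
  unfold matchPair_alt
  exact (bfold_invariant a).2.2.symm
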